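-- pv_equiv track=rewrite | github.com/mhanson13/mbsrn | app/services/seo_sites.py | _normalize_location_service_areas
-- ===== SOURCE A (Python) =====
-- _MAX_SERVICE_AREAS = 25
--
-- def _clean_location_text(value: str | None) -> str | None:
--     if value is None:
--         return None
--     cleaned = " ".join(value.split()).strip()
--     return cleaned or None
--
-- def _normalize_location_service_areas(service_areas: list[str] | None) -> list[str]:
--     if not isinstance(service_areas, list):
--         return []
--     normalized: set[str] = set()
--     for item in service_areas:
--         if not isinstance(item, str):
--             continue
--         compacted = _clean_location_text(item)
--         if compacted:
--             normalized.add(compacted)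
--     return sorted(normalized)[:_MAX_SERVICE_AREAS]
-- ===== SOURCE B (Python) =====
-- _MAX_SERVICE_AREAS = 25
--
--
-- def _insert_bounded(ordered, value, bound):
--     """Insert value into the sorted duplicate-free list `ordered`, keeping only
--     the `bound` smallest entries (drop the largest when it overflows)."""
--     i = 0
--     while i < len(ordered) and ordered[i] < value:
--         i += 1
--     if i < len(ordered) and ordered[i] == value:
--         return
--     ordered.insert(i, value)
--     if len(ordered) > bound:
--         ordered.pop()
--
--
-- def _normalize_location_service_areas(service_areas):
--     if not isinstance(service_areas, list):
--         return []
--     ordered = []  # the up-to-25 smallest distinct cleaned strings, ascending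
--     for item in service_areas:
--         if not isinstance(item, str):
--             continue
--         compacted = " ".join(item.split()).strip()
--         if compacted:
--             _insert_bounded(ordered, compacted, _MAX_SERVICE_AREAS)
--     return ordered
-- ===== Notes on version B (the rewrite author's own statement) =====
-- stated objective: alternative
-- what changed: Replaces the set-accumulate-then-full-sort pipeline with a single pass that maintains a sorted list of at most the 25 smallest distinct cleaned strings via bounded ordered insertion, so no set and no sort call are needed.
import Mathlib
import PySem

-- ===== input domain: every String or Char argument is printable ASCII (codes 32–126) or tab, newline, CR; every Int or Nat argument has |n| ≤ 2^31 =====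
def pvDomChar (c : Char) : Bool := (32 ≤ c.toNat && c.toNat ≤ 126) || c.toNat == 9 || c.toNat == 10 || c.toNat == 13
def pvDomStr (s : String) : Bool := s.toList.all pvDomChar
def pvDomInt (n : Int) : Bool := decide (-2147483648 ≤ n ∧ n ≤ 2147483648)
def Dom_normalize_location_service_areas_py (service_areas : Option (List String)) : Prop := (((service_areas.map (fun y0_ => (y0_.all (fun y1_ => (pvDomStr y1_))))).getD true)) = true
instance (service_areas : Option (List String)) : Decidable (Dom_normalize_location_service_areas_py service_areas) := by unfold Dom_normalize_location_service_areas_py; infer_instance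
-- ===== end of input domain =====

-- B replaces the set-then-full-sort pipeline with one pass keeping a sorted list of at most the
-- 25 smallest distinct cleaned strings by bounded ordered insertion (alternative, same output).

-- ===== PORT A =====
def clean_location_text (value : Option String) : Option String :=
  match value with
  | none => none
  | some v =>
      let cleaned := PySem.Str.strip (PySem.Str.join " " (PySem.Str.split₀ v))
      if cleaned = "" then none else some cleaned

def normalize_location_service_areas_py (service_areas : Option (List String)) : List String :=
  match service_areas with
  | none => []
  | some xs =>
      let normalized : PySem.Set String :=
        xs.foldl (fun s item =>
          match clean_location_text (some item) with
          | none => s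
          | some c => PySem.Set.add s c) PySem.Set.empty
      (PySem.List.sorted normalized (fun x => x) false).take 25

-- ===== PORT B =====
-- recursive transcription of Source B's _insert_bounded: linear scan to the insertion point
-- (the bound shrinks past each kept element), skip a duplicate, insert and trim to the bound
def pvInsertBounded (bound : Nat) (ordered : List String) (value : String) : List String :=
  match ordered with
  | [] => if bound = 0 then [] else [value]
  | y :: ys =>
      if y < value then y :: pvInsertBounded (bound - 1) ys value
      else if y = value then y :: ys
      else (value :: y :: ys).take bound

def normalize_location_service_areas_py_alt (service_areas : Option (List String)) : List String :=
  match service_areas with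
  | none => []
  | some xs =>
      xs.foldl (fun ordered item =>
        if PySem.Str.strip (PySem.Str.join " " (PySem.Str.split₀ item)) = "" then ordered
        else pvInsertBounded 25 ordered (PySem.Str.strip (PySem.Str.join " " (PySem.Str.split₀ item)))) []

-- ===== PRECONDITION & SPEC =====
def Spec_normalize_location_service_areas_py (service_areas : Option (List String)) (out : List String) : Prop := out = normalize_location_service_areas_py_alt service_areas
instance (service_areas : Option (List String)) (out : List String) : Decidable (Spec_normalize_location_service_areas_py service_areas out) := by unfold Spec_normalize_location_service_areas_py; infer_instance

-- ===== CLAIM (what is proved, stated in full; the proofs are below) =====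
def Claim_equal_normalize_location_service_areas_py : Prop := ∀ (service_areas : Option (List String)), Dom_normalize_location_service_areas_py service_areas → Spec_normalize_location_service_areas_py service_areas (normalize_location_service_areas_py service_areas)

-- ===== LEMMAS AND PROOFS =====

-- ghost unbounded ordered insertion: the proof relates both ports through it
def pvInsertUnique (ordered : List String) (value : String) : List String :=
  match ordered with
  | [] => [value]
  | y :: ys =>
      if y < value then y :: pvInsertUnique ys value
      else if y = value then y :: ys
      else value :: y :: ys

theorem pvInsertUnique_of_mem {l : List String} {c : String}
    (hs : l.Pairwise (· < ·)) (hm : c ∈ l) : pvInsertUnique l c = l := by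
  induction l with
  | nil => cases hm
  | cons y ys ih =>
      rw [List.pairwise_cons] at hs
      rcases List.mem_cons.mp hm with rfl | hm'
      · simp [pvInsertUnique]
      · have hlt : y < c := hs.1 c hm'
        simp [pvInsertUnique, hlt, ih hs.2 hm']

theorem pvInsertUnique_perm {l : List String} {c : String} (hm : c ∉ l) :
    (pvInsertUnique l c).Perm (l ++ [c]) := by
  induction l with
  | nil => simp [pvInsertUnique]
  | cons y ys ih =>
      have hy : c ≠ y := fun h => hm (h ▸ List.mem_cons_self)
      have hm' : c ∉ ys := fun h => hm (List.mem_cons_of_mem _ h)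
      by_cases hlt : y < c
      · simpa [pvInsertUnique, hlt] using (ih hm').cons y
      · have hne : y ≠ c := fun h => hy h.symm
        simp only [pvInsertUnique, if_neg hlt, if_neg hne]
        exact (List.perm_append_singleton c (y :: ys)).symm

theorem mem_pvInsertUnique {l : List String} {c x : String} :
    x ∈ pvInsertUnique l c ↔ x = c ∨ x ∈ l := by
  induction l with
  | nil => simp [pvInsertUnique]
  | cons y ys ih =>
      by_cases hlt : y < c
      · simp only [pvInsertUnique, if_pos hlt, List.mem_cons, ih]
        tauto
      · by_cases he : y = c
        · subst he
          simp [pvInsertUnique]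
        · simp [pvInsertUnique, hlt, he]

theorem pvInsertUnique_sorted {l : List String} {c : String}
    (hs : l.Pairwise (· < ·)) : (pvInsertUnique l c).Pairwise (· < ·) := by
  induction l with
  | nil => simp [pvInsertUnique]
  | cons y ys ih =>
      rw [List.pairwise_cons] at hs
      by_cases hlt : y < c
      · simp only [pvInsertUnique, if_pos hlt]
        rw [List.pairwise_cons]
        refine ⟨?_, ih hs.2⟩
        intro a ha
        rcases mem_pvInsertUnique.mp ha with rfl | ha'
        · exact hlt
        · exact hs.1 a ha'
      · by_cases he : y = c
        · simp only [pvInsertUnique, if_neg hlt, if_pos he]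
          exact List.pairwise_cons.mpr hs
        · simp only [pvInsertUnique, if_neg hlt, if_neg he]
          have hcy : c < y := lt_of_le_of_ne (not_lt.mp hlt) (fun h => he h.symm)
          rw [List.pairwise_cons]
          refine ⟨?_, List.pairwise_cons.mpr hs⟩
          intro a ha
          rcases List.mem_cons.mp ha with rfl | ha'
          · exact hcy
          · exact lt_trans hcy (hs.1 a ha')

theorem pvInsertUnique_step {l s : List String} {c : String}
    (hperm : l.Perm s) (hs : l.Pairwise (· < ·)) :
    (pvInsertUnique l c).Perm (PySem.Set.add s c) ∧ (pvInsertUnique l c).Pairwise (· < ·) := by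
  refine ⟨?_, pvInsertUnique_sorted hs⟩
  by_cases hm : c ∈ l
  · have hm' : c ∈ s := hperm.mem_iff.mp hm
    rw [pvInsertUnique_of_mem hs hm]
    simpa [PySem.Set.add, hm'] using hperm
  · have hm' : c ∉ s := fun h => hm (hperm.mem_iff.mpr h)
    have hgoal : PySem.Set.add s c = s ++ [c] := by simp [PySem.Set.add, hm']
    rw [hgoal]
    exact (pvInsertUnique_perm hm).trans (hperm.append_right [c])

-- the unbounded fold is a strictly sorted permutation of A's set
theorem pv_fold_inv (xs : List String) :
    ∀ (l s : List String), l.Perm s → l.Pairwise (· < ·) →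
    (xs.foldl (fun ordered item =>
       if PySem.Str.strip (PySem.Str.join " " (PySem.Str.split₀ item)) = "" then ordered
       else pvInsertUnique ordered (PySem.Str.strip (PySem.Str.join " " (PySem.Str.split₀ item)))) l).Perm
      (xs.foldl (fun s item =>
          match clean_location_text (some item) with
          | none => s
          | some c => PySem.Set.add s c) s) ∧
    (xs.foldl (fun ordered item =>
       if PySem.Str.strip (PySem.Str.join " " (PySem.Str.split₀ item)) = "" then ordered
       else pvInsertUnique ordered (PySem.Str.strip (PySem.Str.join " " (PySem.Str.split₀ item)))) l).Pairwise (· < ·) := by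
  induction xs with
  | nil => intro l s hp hs; exact ⟨hp, hs⟩
  | cons x xs ih =>
      intro l s hp hs
      simp only [List.foldl_cons]
      by_cases he : PySem.Str.strip (PySem.Str.join " " (PySem.Str.split₀ x)) = ""
      · simpa [clean_location_text, he] using ih l s hp hs
      · have := pvInsertUnique_step (c := PySem.Str.strip (PySem.Str.join " " (PySem.Str.split₀ x))) hp hs
        simpa [clean_location_text, he] using ih _ _ this.1 this.2

-- bounded insertion = take k after unbounded insertion (no sortedness needed)
theorem pvInsertBounded_take (c : String) :
    ∀ (l : List String) (k : Nat), pvInsertBounded k (l.take k) c = (pvInsertUnique l c).take k := by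
  intro l
  induction l with
  | nil =>
      intro k
      cases k with
      | zero => simp [pvInsertBounded, pvInsertUnique]
      | succ k => simp [pvInsertBounded, pvInsertUnique]
  | cons y ys ih =>
      intro k
      cases k with
      | zero => simp [pvInsertBounded, pvInsertUnique]
      | succ k =>
          simp only [List.take_succ_cons, pvInsertBounded, pvInsertUnique]
          by_cases hlt : y < c
          · simp [hlt, ih k]
          · by_cases he : y = c
            · simp [he]
            · have : (y :: ys.take k).take k = (y :: ys).take k := by
                have h1 : y :: ys.take k = (y :: ys).take (k + 1) := by simp
                rw [h1, List.take_take]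
                simp
              simp only [if_neg hlt, if_neg he, List.take_succ_cons, this]

-- B's bounded fold = take 25 of the unbounded fold
theorem pv_fold_bounded (xs : List String) :
    ∀ (l : List String),
    (xs.foldl (fun ordered item =>
       if PySem.Str.strip (PySem.Str.join " " (PySem.Str.split₀ item)) = "" then ordered
       else pvInsertBounded 25 ordered (PySem.Str.strip (PySem.Str.join " " (PySem.Str.split₀ item)))) (l.take 25)) =
    (xs.foldl (fun ordered item =>
       if PySem.Str.strip (PySem.Str.join " " (PySem.Str.split₀ item)) = "" then ordered
       else pvInsertUnique ordered (PySem.Str.strip (PySem.Str.join " " (PySem.Str.split₀ item)))) l).take 25 := by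
  induction xs with
  | nil => intro l; rfl
  | cons x xs ih =>
      intro l
      simp only [List.foldl_cons]
      by_cases he : PySem.Str.strip (PySem.Str.join " " (PySem.Str.split₀ x)) = ""
      · simpa [he] using ih l
      · simp only [if_neg he]
        rw [pvInsertBounded_take _ l 25]
        exact ih (pvInsertUnique l (PySem.Str.strip (PySem.Str.join " " (PySem.Str.split₀ x))))

-- ===== VERDICT (by name: the statement is the Claim_ definition above) =====
theorem normalize_location_service_areas_py_spec : Claim_equal_normalize_location_service_areas_py := by
  intro sa _
  unfold Spec_normalize_location_service_areas_py
  match sa with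
  | none => rfl
  | some xs =>
      simp only [normalize_location_service_areas_py, normalize_location_service_areas_py_alt]
      have h := pv_fold_inv xs [] PySem.Set.empty (List.Perm.refl _) (List.Pairwise.nil)
      rw [PySem.List.sorted_eq_of_perm_of_pairwise_lt _ _ _ h.1 (by simpa using h.2)]
      have hb := pv_fold_bounded xs []
      simpa using hb.symm
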